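-- pv_equiv track=rewrite | github.com/rainref/Genetic-Template | gene_generate.py | extract_defect_lines
-- ===== SOURCE A (Python) =====
-- def extract_defect_lines(diff_content):
--     defect_lines = []
--     current_defect = []
--     lines = diff_content
--     for line in lines:
--         if line.startswith("-") and line[1] != '-':
--             # If a line starts with +, it's part of a defect block.
--             current_defect.append(line[1:].strip())
--         else:
--             if current_defect:
--                 # If we reach a non-defect line and have accumulated defect lines, save them as a block.
--                 defect_lines.append("\n".join(current_defect))
--                 current_defect = []
--
--     # If the last lines were a defect block, save them too.
--     if current_defect:
--         defect_lines.append("\n".join(current_defect))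
--     return defect_lines
-- ===== SOURCE B (Python) =====
-- from itertools import groupby
--
--
-- def extract_defect_lines(diff_content):
--     return [
--         "\n".join(line[1:].strip() for line in group)
--         for key, group in groupby(
--             diff_content, key=lambda line: line.startswith("-") and line[1] != "-"
--         )
--         if key
--     ]
-- ===== Notes on version B (the rewrite author's own statement) =====
-- stated objective: idiomatic
-- what changed: Replaces the explicit current_defect accumulator with its post-loop flush by itertools.groupby over runs of minus-prefixed lines, joining each kept run in a comprehension.
import Mathlib
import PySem

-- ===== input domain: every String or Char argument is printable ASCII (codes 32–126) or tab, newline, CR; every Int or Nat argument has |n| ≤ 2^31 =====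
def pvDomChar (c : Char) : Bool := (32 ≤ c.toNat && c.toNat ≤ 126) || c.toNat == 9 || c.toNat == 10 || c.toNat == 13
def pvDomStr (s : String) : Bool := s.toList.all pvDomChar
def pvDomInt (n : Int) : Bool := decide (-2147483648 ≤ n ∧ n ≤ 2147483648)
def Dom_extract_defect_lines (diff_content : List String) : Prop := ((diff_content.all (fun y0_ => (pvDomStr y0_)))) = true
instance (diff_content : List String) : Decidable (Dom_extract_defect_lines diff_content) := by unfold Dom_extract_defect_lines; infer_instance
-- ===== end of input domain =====

-- B replaces A's explicit accumulator + post-loop flush with itertools.groupby over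
-- runs of minus-prefixed lines (idiomatic; same cost). Equal return values on Pre_.

-- ===== PORT A =====
-- line.startswith("-") and line[1] != '-'   (line[1] total here via pyGet?; Pre_ excludes the bare "-" line, on which Python raises IndexError)
def pvIsDefect (line : String) : Bool :=
  PySem.Str.startswith line "-" && !(PySem.Str.pyGet? line 1 == some '-')

-- line[1:].strip()
def pvStripTail (line : String) : String :=
  PySem.Str.strip (PySem.Str.slice line (some 1) none)

def extract_defect_lines (diff_content : List String) : List String :=
  let st := diff_content.foldl
    (fun (st : List String × List String) line =>
      if pvIsDefect line then (st.1, st.2 ++ [pvStripTail line])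
      else if st.2 ≠ [] then (st.1 ++ [PySem.Str.join "\n" st.2], [])
      else st)
    ([], [])
  if st.2 ≠ [] then st.1 ++ [PySem.Str.join "\n" st.2] else st.1

-- ===== PORT B =====
-- itertools.groupby: peel off each maximal run of lines with the same key, keep the runs whose key is true
def extract_defect_lines_alt (diff_content : List String) : List String :=
  match diff_content with
  | [] => []
  | l :: rest =>
    let k := pvIsDefect l
    let run := rest.takeWhile (fun x => pvIsDefect x == k)
    let rest' := rest.dropWhile (fun x => pvIsDefect x == k)
    if k then
      PySem.Str.join "\n" ((l :: run).map pvStripTail) :: extract_defect_lines_alt rest'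
    else
      extract_defect_lines_alt rest'
termination_by diff_content.length
decreasing_by
  all_goals
    simp only [List.length_cons]
    exact Nat.lt_succ_of_le (List.length_dropWhile_le _ _)

-- ===== PRECONDITION & SPEC =====
-- Pre_ excludes inputs containing the line "-", on which A's 'line[1]' raises IndexError (B raises there too).
def Pre_extract_defect_lines (diff_content : List String) : Prop := "-" ∉ diff_content
instance (diff_content : List String) : Decidable (Pre_extract_defect_lines diff_content) := by
  unfold Pre_extract_defect_lines; infer_instance

def pvWitness_extract_defect_lines : List String := ["-fix a", "-fix b", "ctx", "--- header", "-last"]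

def Spec_extract_defect_lines (diff_content : List String) (out : List String) : Prop := out = extract_defect_lines_alt diff_content
instance (diff_content : List String) (out : List String) : Decidable (Spec_extract_defect_lines diff_content out) := by unfold Spec_extract_defect_lines; infer_instance

-- ===== CLAIM (what is proved, stated in full; the proofs are below) =====
def Claim_equal_extract_defect_lines : Prop := ∀ (diff_content : List String), Dom_extract_defect_lines diff_content → Pre_extract_defect_lines diff_content → Spec_extract_defect_lines diff_content (extract_defect_lines diff_content)

-- ===== LEMMAS AND PROOFS =====

-- Proof-side recursion equivalent to A's loop, with pending block 'cur'
def pvAux (cur : List String) (lines : List String) : List String :=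
  match lines with
  | [] => if cur ≠ [] then [PySem.Str.join "\n" cur] else []
  | l :: rest =>
    if pvIsDefect l then pvAux (cur ++ [pvStripTail l]) rest
    else (if cur ≠ [] then [PySem.Str.join "\n" cur] else []) ++ pvAux [] rest

theorem pvA_eq_aux (lines : List String) : ∀ (acc cur : List String),
    (let st := lines.foldl
      (fun (st : List String × List String) line =>
        if pvIsDefect line then (st.1, st.2 ++ [pvStripTail line])
        else if st.2 ≠ [] then (st.1 ++ [PySem.Str.join "\n" st.2], [])
        else st) (acc, cur)
     if st.2 ≠ [] then st.1 ++ [PySem.Str.join "\n" st.2] else st.1)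
    = acc ++ pvAux cur lines := by
  induction lines with
  | nil =>
    intro acc cur
    simp only [List.foldl_nil, pvAux]
    by_cases h : cur = [] <;> simp [h]
  | cons l rest ih =>
    intro acc cur
    simp only [List.foldl_cons, pvAux]
    by_cases hd : pvIsDefect l
    · simp only [hd, if_pos]
      exact ih acc (cur ++ [pvStripTail l])
    · simp only [hd, if_neg, Bool.false_eq_true, not_false_iff]
      by_cases hc : cur = []
      · simp only [hc, ne_eq, not_true_eq_false, if_neg, if_false, List.nil_append]
        simpa using ih acc []
      · simp only [ne_eq, hc, not_false_iff, if_pos, if_true]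
        rw [ih (acc ++ [PySem.Str.join "\n" cur]) []]
        simp [hc]

theorem pvSkip (lines : List String) :
    extract_defect_lines_alt (lines.dropWhile (fun x => !(pvIsDefect x))) = extract_defect_lines_alt lines := by
  cases lines with
  | nil => simp
  | cons l rest =>
    by_cases hd : pvIsDefect l
    · simp [List.dropWhile_cons, hd]
    · rw [List.dropWhile_cons]
      simp only [hd, Bool.not_false, if_pos]
      conv_rhs => rw [extract_defect_lines_alt]
      simp [hd]

theorem pvAux_eq_alt (n : Nat) : ∀ (lines : List String), lines.length ≤ n → ∀ (cur : List String),
    pvAux cur lines =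
      (if cur = [] then extract_defect_lines_alt lines
       else PySem.Str.join "\n" (cur ++ (lines.takeWhile pvIsDefect).map pvStripTail)
            :: extract_defect_lines_alt (lines.dropWhile pvIsDefect)) := by
  induction n with
  | zero =>
    intro lines hlen cur
    have : lines = [] := List.eq_nil_of_length_eq_zero (Nat.le_zero.mp hlen)
    subst this
    simp only [pvAux, List.takeWhile_nil, List.dropWhile_nil, List.map_nil, List.append_nil]
    by_cases hc : cur = [] <;> simp [hc, extract_defect_lines_alt]
  | succ n ih =>
    intro lines hlen cur
    cases lines with
    | nil =>
      simp only [pvAux, List.takeWhile_nil, List.dropWhile_nil, List.map_nil, List.append_nil]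
      by_cases hc : cur = [] <;> simp [hc, extract_defect_lines_alt]
    | cons l rest =>
      have hrest : rest.length ≤ n := by simpa using Nat.succ_le_succ_iff.mp hlen
      by_cases hd : pvIsDefect l
      · -- defect head: the pending block grows
        rw [pvAux, if_pos hd, ih rest hrest (cur ++ [pvStripTail l])]
        simp only [List.takeWhile_cons, List.dropWhile_cons, hd, if_pos]
        by_cases hc : cur = []
        · subst hc
          have he : (fun x => pvIsDefect x == pvIsDefect l) = fun x => pvIsDefect x := by
            funext x; rw [hd]; cases pvIsDefect x <;> rfl
          conv_rhs => rw [extract_defect_lines_alt]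
          simp only [List.nil_append]
          rw [if_neg (List.cons_ne_nil (pvStripTail l) [])]
          simp only [if_true]
          rw [if_pos hd, he]
          simp only [List.map_cons, List.singleton_append]
        · simp [hc, List.map_cons, List.append_assoc]
      · -- non-defect head: flush (if pending) and skip the non-defect run
        simp only [pvAux, hd, Bool.false_eq_true, if_neg, not_false_iff]
        rw [ih rest hrest []]
        simp only [if_pos, List.takeWhile_cons, List.dropWhile_cons, hd, Bool.false_eq_true,
          if_neg, not_false_iff]
        have hskip : extract_defect_lines_alt rest = extract_defect_lines_alt (l :: rest) := by
          rw [← pvSkip (l :: rest)]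
          simp only [List.dropWhile_cons, hd, Bool.not_false, if_pos]
          exact (pvSkip rest).symm
        by_cases hc : cur = []
        · simp [hc, hskip]
        · simp [hc, hskip]

-- ===== VERDICT (by name: the statement is the Claim_ definition above) =====
theorem extract_defect_lines_spec : Claim_equal_extract_defect_lines := by
  intro diff_content _ _
  unfold Spec_extract_defect_lines extract_defect_lines
  rw [pvA_eq_aux diff_content [] []]
  rw [pvAux_eq_alt diff_content.length diff_content (le_refl _) []]
  simp
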